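-- pv_equiv track=rewrite | github.com/TIKYIKHANT-hyper/PythonJuniorDev | bubblesortonce.py | bubblesort_once
-- ===== SOURCE A (Python) =====
-- def bubblesort_once(l):
--     newlist = list(l)
--     for i in range(0,len(l)-1,1):
--         if newlist[i] > newlist[i+1]:
--             tempdata = newlist[i]
--             newlist[i] = newlist[i+1]
--             newlist[i+1] = tempdata
--     return newlist
-- ===== SOURCE B (Python) =====
-- def bubblesort_once(l):
--     if not l:
--         return []
--     result = []
--     carry = l[0]
--     for x in l[1:]:
--         if carry > x:
--             result.append(x)
--         else:
--             result.append(carry)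
--             carry = x
--     result.append(carry)
--     return result
-- ===== Notes on version B (the rewrite author's own statement) =====
-- stated objective: alternative
-- what changed: Replaces the copy-and-swap-by-index pass with an accumulator scan that carries the current bubbling maximum and appends the smaller element at each step, never indexing or mutating the list.
import Mathlib
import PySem

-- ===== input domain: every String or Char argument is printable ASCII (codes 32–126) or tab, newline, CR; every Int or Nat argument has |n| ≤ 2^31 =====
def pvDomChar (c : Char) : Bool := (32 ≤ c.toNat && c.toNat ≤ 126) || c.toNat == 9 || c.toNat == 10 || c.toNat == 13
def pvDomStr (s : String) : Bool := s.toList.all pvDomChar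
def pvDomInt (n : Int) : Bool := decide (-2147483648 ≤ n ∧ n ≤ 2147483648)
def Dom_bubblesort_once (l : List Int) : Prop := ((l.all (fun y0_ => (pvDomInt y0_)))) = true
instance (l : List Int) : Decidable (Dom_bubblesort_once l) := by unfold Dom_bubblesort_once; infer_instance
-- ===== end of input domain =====

-- B replaces the copy-and-swap-by-index bubble pass with an accumulator scan carrying the bubbling maximum (alternative decomposition, same cost).


-- ===== PORT A =====
-- one iteration of A's loop body: compare newlist[i] and newlist[i+1], swap via two index assignments
def pvSwapStep (newlist : List Int) (i : Int) : List Int :=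
  if PySem.List.pyGetD newlist i 0 > PySem.List.pyGetD newlist (i+1) 0 then
    let tempdata := PySem.List.pyGetD newlist i 0
    PySem.List.pySetD (PySem.List.pySetD newlist i (PySem.List.pyGetD newlist (i+1) 0)) (i+1) tempdata
  else newlist

def bubblesort_once (l : List Int) : List Int :=
  (PySem.List.pyRange 0 ((l.length : Int) - 1) 1).foldl pvSwapStep l

-- ===== PORT B =====
-- B's scan: carry the current bubbling maximum, append the smaller element at each step
def pvCarryGo (carry : Int) : List Int → List Int
  | [] => [carry]
  | x :: xs => if carry > x then x :: pvCarryGo carry xs else carry :: pvCarryGo x xs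

def bubblesort_once_alt (l : List Int) : List Int :=
  match l with
  | [] => []
  | x :: xs => pvCarryGo x xs

-- ===== PRECONDITION & SPEC =====
def Spec_bubblesort_once (l : List Int) (out : List Int) : Prop := out = bubblesort_once_alt l
instance (l : List Int) (out : List Int) : Decidable (Spec_bubblesort_once l out) := by unfold Spec_bubblesort_once; infer_instance

-- ===== CLAIM (what is proved, stated in full; the proofs are below) =====
def Claim_equal_bubblesort_once : Prop := ∀ (l : List Int), Dom_bubblesort_once l → Spec_bubblesort_once l (bubblesort_once l)

-- ===== LEMMAS AND PROOFS =====

theorem pvGetD_append_len (acc : List Int) (c : Int) (rest : List Int) (d : Int) :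
    PySem.List.pyGetD (acc ++ c :: rest) (acc.length : Int) d = c := by
  rw [PySem.List.pyGetD_natCast]
  simp [List.getD]

theorem pvGetD_append_len_succ (acc : List Int) (c x : Int) (rest : List Int) (d : Int) :
    PySem.List.pyGetD (acc ++ c :: x :: rest) ((acc.length : Int) + 1) d = x := by
  have : ((acc.length : Int) + 1) = ((acc.length + 1 : Nat) : Int) := by omega
  rw [this, PySem.List.pyGetD_natCast]
  simp [List.getD]

theorem pvSet_append_len (acc : List Int) (c : Int) (rest : List Int) (v : Int) :
    (acc ++ c :: rest).set acc.length v = acc ++ v :: rest := by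
  simp

theorem pvSet_append_len_succ (acc : List Int) (c x : Int) (rest : List Int) (v : Int) :
    (acc ++ c :: x :: rest).set (acc.length + 1) v = acc ++ c :: v :: rest := by
  simp

theorem pvMain (xs : List Int) : ∀ (acc : List Int) (c : Int),
    (PySem.List.pyRange (acc.length : Int) ((acc.length : Int) + (xs.length : Int)) 1).foldl
      pvSwapStep (acc ++ c :: xs) = acc ++ pvCarryGo c xs := by
  induction xs with
  | nil =>
    intro acc c
    simp [PySem.List.pyRange_one_eq_nil, pvCarryGo]
  | cons x xs ih =>
    intro acc c
    have hlt : (acc.length : Int) < (acc.length : Int) + ((x :: xs).length : Int) := by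
      simp
    rw [PySem.List.pyRange_one_cons hlt]
    simp only [List.foldl_cons]
    have hg1 := pvGetD_append_len acc c (x :: xs) 0
    have hg2 := pvGetD_append_len_succ acc c x xs 0
    by_cases h : c > x
    · have hstep : pvSwapStep (acc ++ c :: x :: xs) (acc.length : Int) = acc ++ x :: c :: xs := by
        unfold pvSwapStep
        rw [hg1, hg2, if_pos h]
        have h1 : ((acc.length : Int) + 1) = ((acc.length + 1 : Nat) : Int) := by omega
        rw [PySem.List.pySetD_natCast, pvSet_append_len, h1, PySem.List.pySetD_natCast,
          pvSet_append_len_succ]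
      rw [hstep]
      have harr : (acc ++ x :: c :: xs) = (acc ++ [x]) ++ c :: xs := by simp
      have hlen : ((acc ++ [x]).length : Int) = (acc.length : Int) + 1 := by simp
      have hrng : PySem.List.pyRange ((acc.length : Int) + 1)
          ((acc.length : Int) + ((x :: xs).length : Int)) 1
          = PySem.List.pyRange ((acc ++ [x]).length : Int)
            (((acc ++ [x]).length : Int) + (xs.length : Int)) 1 := by
        (congr 1 <;> simp) <;> omega
      rw [harr, hrng, ih (acc ++ [x]) c]
      simp [pvCarryGo, h]
    · have hstep : pvSwapStep (acc ++ c :: x :: xs) (acc.length : Int) = acc ++ c :: x :: xs := by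
        unfold pvSwapStep
        rw [hg1, hg2, if_neg h]
      rw [hstep]
      have harr : (acc ++ c :: x :: xs) = (acc ++ [c]) ++ x :: xs := by simp
      have hrng : PySem.List.pyRange ((acc.length : Int) + 1)
          ((acc.length : Int) + ((x :: xs).length : Int)) 1
          = PySem.List.pyRange ((acc ++ [c]).length : Int)
            (((acc ++ [c]).length : Int) + (xs.length : Int)) 1 := by
        (congr 1 <;> simp) <;> omega
      rw [harr, hrng, ih (acc ++ [c]) x]
      simp [pvCarryGo, h]

-- ===== VERDICT (by name: the statement is the Claim_ definition above) =====
theorem bubblesort_once_spec : Claim_equal_bubblesort_once := by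
  intro l _
  unfold Spec_bubblesort_once bubblesort_once bubblesort_once_alt
  match l with
  | [] => simp [PySem.List.pyRange_one_eq_nil]
  | x :: xs =>
    have := pvMain xs [] x
    simp only [List.length_nil, Nat.cast_zero, List.nil_append, zero_add] at this
    rw [show ((((x :: xs).length : Nat) : Int) - 1) = (xs.length : Int) by simp, this]
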